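-- pv_equiv track=rewrite | github.com/fdeshpande/Python_fundamentals | Hackerrank/string.py | getLargestString
-- ===== SOURCE A (Python) =====
-- from collections import Counter
--
-- def getLargestString(s, k):
--     d = Counter(s)
--     result = []
--
--     while d:
--         chars = sorted(d.keys(), reverse=True)
--
--         for ch in chars:
--             if d[ch] == 0:
--                 continue
--
--             to_add = min(d[ch], k)
--             result.append(ch * to_add)
--             d[ch] -= to_add
--
--             if d[ch] == 0:
--                 del d[ch]
--
--             if len(result) > k and result[-1] * k == result[-k:]:
--                 if d:
--                     for next_ch in chars:
--                         if next_ch in d and d[next_ch] > 0: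
--                             result.append(next_ch)
--                             d[next_ch] -= 1
--
--                             if d[next_ch] == 0:
--                                 del d[next_ch]
--                             break
--
--     return ''.join(result)
-- ===== SOURCE B (Python) =====
-- from collections import Counter
--
-- def getLargestString(s, k):
--     cnt = Counter(s)
--     chars = sorted(cnt, reverse=True)
--     # per-char column: its block split into k-sized chunks (last one shorter)
--     columns = []
--     for ch in chars:
--         c = cnt[ch]
--         columns.append([ch * min(k, c - i) for i in range(0, c, k)])
--     rounds = 0
--     for col in columns:
--         rounds = max(rounds, len(col))
--     out = []
--     for i in range(rounds):
--         for col in columns: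
--             if i < len(col):
--                 out.append(col[i])
--     return ''.join(out)
-- ===== Notes on version B (the rewrite author's own statement) =====
-- stated objective: alternative
-- what changed: A repeatedly re-sorts and mutates a Counter in a while-loop (its str-vs-list comparison branch can never fire); B builds each character's list of k-sized chunk strings once and emits the table column-major (round by round), with no re-sorting or mutation.
import Mathlib
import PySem

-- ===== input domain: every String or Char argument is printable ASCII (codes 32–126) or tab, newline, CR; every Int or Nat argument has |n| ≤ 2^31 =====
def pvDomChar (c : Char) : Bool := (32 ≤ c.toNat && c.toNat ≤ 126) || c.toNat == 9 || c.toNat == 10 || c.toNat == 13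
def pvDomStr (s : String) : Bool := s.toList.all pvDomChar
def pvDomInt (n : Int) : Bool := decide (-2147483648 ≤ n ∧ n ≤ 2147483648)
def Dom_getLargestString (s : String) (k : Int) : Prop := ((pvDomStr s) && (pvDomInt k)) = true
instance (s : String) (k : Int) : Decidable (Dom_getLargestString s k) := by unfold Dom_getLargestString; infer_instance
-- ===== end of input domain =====

-- B replaces A's repeatedly re-sorting, Counter-mutating while-loop by building each character's
-- k-chunk list once and reading the table column-major (simpler single plan, no re-sorting).

-- ===== PORT A =====

-- Python 'ch * n' (char repeated n times; n ≤ 0 gives "")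
def strRepeat (ch : Char) (n : Int) : String := String.ofList (List.replicate n.toNat ch)

-- Python 's * n' (string repetition)
def strMul (s : String) (n : Int) : String := String.ofList (List.replicate n.toNat s.toList).flatten

-- Python '==' between a str and a list of str: different types, always False (exact)
def pyEqStrList (_a : String) (_b : List String) : Bool := false

-- the 'for next_ch in chars: … break' loop inside A
def aGiveNext (chars : List Char) (st : List String × PySem.Dict Char Int) :
    List String × PySem.Dict Char Int :=
  match chars with
  | [] => st
  | next_ch :: rest =>
    if st.2.contains next_ch && decide (0 < st.2.getD next_ch 0) then
      let d1 := st.2.insert next_ch (st.2.getD next_ch 0 - 1)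
      (st.1 ++ [String.ofList [next_ch]], if d1.getD next_ch 0 == 0 then d1.erase next_ch else d1)
    else aGiveNext rest st

-- one iteration of A's 'for ch in chars' body
def aStep (k : Int) (chars : List Char) (st : List String × PySem.Dict Char Int) (ch : Char) :
    List String × PySem.Dict Char Int :=
  if st.2.getD ch 0 == 0 then st
  else
    let toAdd := min (st.2.getD ch 0) k
    let result := st.1 ++ [strRepeat ch toAdd]
    let d1 := st.2.insert ch (st.2.getD ch 0 - toAdd)
    let d2 := if d1.getD ch 0 == 0 then d1.erase ch else d1
    if decide (k < (result.length : Int)) &&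
        pyEqStrList (strMul (PySem.List.pyGetD result (-1) "") k)
          (PySem.List.slice result (some (-k)) none) then
      if d2.size != 0 then aGiveNext chars (result, d2) else (result, d2)
    else (result, d2)

-- A's 'while d:' loop (fuel: one unit per round; s.length + 1 rounds always suffice when k ≥ 1)
def aLoop (k : Int) : Nat → List String × PySem.Dict Char Int → List String
  | 0, st => st.1
  | fuel+1, st =>
    if st.2.size == 0 then st.1
    else
      let chars := PySem.List.sorted st.2.keys (fun x => x) true
      aLoop k fuel (chars.foldl (aStep k chars) st)

def getLargestString (s : String) (k : Int) : String :=
  PySem.Str.join "" (aLoop k (s.toList.length + 1) ([], PySem.Dict.counter s.toList))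

-- ===== PORT B =====

def getLargestString_alt (s : String) (k : Int) : String :=
  let cnt := PySem.Dict.counter s.toList
  let chars := PySem.List.sorted cnt.keys (fun x => x) true
  let columns := chars.foldl (fun cols ch =>
      cols ++ [(PySem.List.pyRange 0 (cnt.getD ch 0) k).map
                 (fun i => strRepeat ch (min k (cnt.getD ch 0 - i)))]) []
  let rounds := columns.foldl (fun r col => max r (col.length : Int)) 0
  let out := (PySem.List.pyRange 0 rounds 1).foldl (fun out i =>
      columns.foldl (fun out col =>
        if i < (col.length : Int) then out ++ [PySem.List.pyGetD col i ""] else out) out)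
    ([] : List String)
  PySem.Str.join "" out

-- ===== PRECONDITION & SPEC =====
-- Pre_ excludes k ≤ 0 with a nonempty s: there A never returns (its while-loop cannot empty the
-- Counter), so there is no return value to match.
def Pre_getLargestString (s : String) (k : Int) : Prop := s = "" ∨ 1 ≤ k
instance (s : String) (k : Int) : Decidable (Pre_getLargestString s k) := by
  unfold Pre_getLargestString; infer_instance

def pvWitness_getLargestString : String × Int := ("baab", 2)

def Spec_getLargestString (s : String) (k : Int) (out : String) : Prop := out = getLargestString_alt s k
instance (s : String) (k : Int) (out : String) : Decidable (Spec_getLargestString s k out) := by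
  unfold Spec_getLargestString; infer_instance

-- ===== CLAIM (what is proved, stated in full; the proofs are below) =====
def Claim_equal_getLargestString : Prop := ∀ (s : String) (k : Int), Dom_getLargestString s k → Pre_getLargestString s k → Spec_getLargestString s k (getLargestString s k)

-- ===== LEMMAS AND PROOFS =====

def specStep (k : Int) (cs : List (Char × Int)) : List (Char × Int) :=
  cs.filterMap (fun p => if k < p.2 then some (p.1, p.2 - k) else none)

def specRows (k : Int) : Nat → List (Char × Int) → List String
  | 0, _ => []
  | _+1, [] => []
  | fuel+1, p :: cs =>
    (p :: cs).map (fun q => strRepeat q.1 (min q.2 k)) ++ specRows k fuel (specStep k (p :: cs))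

def pairsOf (d : PySem.Dict Char Int) : List (Char × Int) :=
  (PySem.List.sorted d.keys (fun x => x) true).map (fun x => (x, d.getD x 0))

lemma getD_erase_of_ne {d : PySem.Dict Char Int} {ch x : Char} (h : x ≠ ch) (v : Int) :
    (d.erase ch).getD x v = d.getD x v := by
  simp only [PySem.Dict.erase, PySem.Dict.getD, PySem.Dict.get?, List.find?_filter]
  have hpq : (fun a : Char × Int => decide ((!a.1 == ch) = true ∧ (a.1 == x) = true))
      = (fun p : Char × Int => p.1 == x) := by
    funext a
    by_cases h1 : a.1 = x
    · have h2 : a.1 ≠ ch := by rw [h1]; exact h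
      simp [h1, h2, h]
    · simp [h1]
  rw [hpq]

lemma contains_of_getD_pos {d : PySem.Dict Char Int} {ch : Char} (h : 1 ≤ d.getD ch 0) :
    d.contains ch = true := by
  cases hb : d.contains ch with
  | true => rfl
  | false => rw [PySem.Dict.getD_of_not_contains d 0 hb] at h; omega

lemma aRound_fold (k : Int) (chars : List Char) :
    ∀ (todo : List Char) (res : List String) (d : PySem.Dict Char Int),
    1 ≤ k → todo.Nodup → (∀ ch ∈ todo, 1 ≤ d.getD ch 0) → d.keys.Nodup →
    todo.foldl (aStep k chars) (res, d) =
      (res ++ todo.map (fun ch => strRepeat ch (min (d.getD ch 0) k)),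
       PySem.Dict.mk (d.items.filterMap (fun p =>
         if p.1 ∈ todo then (if k < p.2 then some (p.1, p.2 - k) else none) else some p))) := by
  intro todo
  induction todo with
  | nil =>
    intro res d hk hnd hmem hdk
    simp
  | cons ch rest ih =>
    intro res d hk hnd hmem hdk
    have hc : 1 ≤ d.getD ch 0 := hmem ch (by simp)
    have hcont : d.contains ch = true := contains_of_getD_pos hc
    have hchr : ch ∉ rest := (List.nodup_cons.mp hnd).1
    rw [List.foldl_cons]
    have hstep : aStep k chars (res, d) ch =
        (res ++ [strRepeat ch (min (d.getD ch 0) k)],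
         if (d.insert ch (d.getD ch 0 - min (d.getD ch 0) k)).getD ch 0 == 0
         then (d.insert ch (d.getD ch 0 - min (d.getD ch 0) k)).erase ch
         else d.insert ch (d.getD ch 0 - min (d.getD ch 0) k)) := by
      simp only [aStep, pyEqStrList, Bool.and_false, if_neg, Bool.false_eq_true,
        not_false_iff, if_false]
      have : (d.getD ch 0 == 0) = false := by simp; omega
      rw [this]
      simp
    rw [hstep]
    by_cases hck : k < d.getD ch 0
    -- case k < c : count survives with value c - k
    · have hmin : min (d.getD ch 0) k = k := min_eq_right (le_of_lt hck)
      have hne : ((d.insert ch (d.getD ch 0 - k)).getD ch 0 == 0) = false := by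
        rw [PySem.Dict.getD_insert_self]; simp; omega
      rw [hmin, hne]
      simp only [Bool.false_eq_true, if_false]
      set d2 := d.insert ch (d.getD ch 0 - k) with hd2
      have hgd2 : ∀ x ∈ rest, d2.getD x 0 = d.getD x 0 := by
        intro x hx
        exact PySem.Dict.getD_insert_of_ne d _ _ (by rintro rfl; exact hchr hx)
      rw [ih _ d2 hk (List.nodup_cons.mp hnd).2
        (fun x hx => (hgd2 x hx) ▸ hmem x (List.mem_cons_of_mem _ hx))
        (PySem.Dict.nodup_keys_insert d _ _ hdk)]
      rw [Prod.mk.injEq]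
      constructor
      · rw [List.append_assoc]
        congr 1
        rw [List.map_cons, hmin, List.singleton_append]
        congr 1
        exact List.map_congr_left (fun x hx => by rw [hgd2 x hx])
      · congr 1
        rw [hd2, PySem.Dict.items_insert_of_contains d _ hcont, List.filterMap_map]
        apply List.filterMap_congr
        intro p hp
        by_cases hpch : p.1 = ch
        · have hp2 : p.2 = d.getD ch 0 := by
            have hp' : (p.1, p.2) ∈ d.items := by simpa using hp
            rw [← hpch]
            exact (PySem.Dict.getD_of_mem_items d hp' hdk 0).symm
          simp only [Function.comp, hpch, BEq.rfl, if_true]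
          simp [hchr, hpch, hp2, hck]
        · simp only [Function.comp]
          have : (p.1 == ch) = false := by simp [hpch]
          rw [this]
          simp only [Bool.false_eq_true, if_false]
          simp [List.mem_cons, hpch]
    -- case c ≤ k : char is exhausted and erased
    · have hmin : min (d.getD ch 0) k = d.getD ch 0 := min_eq_left (by omega)
      have hze : ((d.insert ch (d.getD ch 0 - d.getD ch 0)).getD ch 0 == 0) = false ∨ True := Or.inr trivial
      rw [hmin]
      have heq0 : ((d.insert ch (d.getD ch 0 - d.getD ch 0)).getD ch 0 == 0) = true := by
        rw [PySem.Dict.getD_insert_self]; simp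
      rw [heq0]
      simp only [if_true]
      set d1 := d.insert ch (d.getD ch 0 - d.getD ch 0) with hd1
      have hd2items : (d1.erase ch).items = d.items.filter (fun q => !(q.1 == ch)) := by
        simp only [PySem.Dict.erase, hd1, PySem.Dict.items_insert_of_contains d _ hcont]
        rw [List.filter_map]
        have hpred : ∀ q ∈ d.items,
            ((fun p : Char × Int => !(p.1 == ch)) ∘ (fun p : Char × Int => if (p.1 == ch) = true then (ch, d.getD ch 0 - d.getD ch 0) else p)) q
              = (fun q : Char × Int => !(q.1 == ch)) q := by
          intro q hq
          by_cases hq1 : q.1 = ch <;> simp [hq1]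
        rw [List.filter_congr hpred]
        rw [show List.map (fun p : Char × Int => if (p.1 == ch) = true then (ch, d.getD ch 0 - d.getD ch 0) else p)
              (List.filter (fun q : Char × Int => !(q.1 == ch)) d.items)
            = List.map id (List.filter (fun q : Char × Int => !(q.1 == ch)) d.items) from
          List.map_congr_left (fun q hq => by
            have hqc : (q.1 == ch) = false := by simpa using List.of_mem_filter hq
            simp [hqc])]
        simp
      have hgd2 : ∀ x ∈ rest, (d1.erase ch).getD x 0 = d.getD x 0 := by
        intro x hx
        have hxch : x ≠ ch := by rintro rfl; exact hchr hx
        rw [getD_erase_of_ne hxch, hd1, PySem.Dict.getD_insert_of_ne d _ _ hxch]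
      have hkeys : (d1.erase ch).keys.Nodup := by
        have hs : (d1.erase ch).keys.Sublist d1.keys := by
          simp only [PySem.Dict.erase, PySem.Dict.keys]
          exact List.Sublist.map _ (List.filter_sublist)
        exact hs.nodup (PySem.Dict.nodup_keys_insert d _ _ hdk)
      rw [ih _ (d1.erase ch) hk (List.nodup_cons.mp hnd).2
        (fun x hx => (hgd2 x hx) ▸ hmem x (List.mem_cons_of_mem _ hx)) hkeys]
      rw [Prod.mk.injEq]
      constructor
      · rw [List.append_assoc]
        congr 1
        rw [List.map_cons, hmin, List.singleton_append]
        congr 1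
        exact List.map_congr_left (fun x hx => by rw [hgd2 x hx])
      · congr 1
        rw [hd2items, List.filterMap_filter]
        apply List.filterMap_congr
        intro p hp
        by_cases hpch : p.1 = ch
        · have hp2 : p.2 = d.getD ch 0 := by
            have hp' : (p.1, p.2) ∈ d.items := by simpa using hp
            rw [← hpch]
            exact (PySem.Dict.getD_of_mem_items d hp' hdk 0).symm
          simp [hpch, hp2, hck]
        · simp [hpch, List.mem_cons]
-- a filterMap by 'if c then some (f x) else none' is filter-then-map
lemma filterMap_ite {α β : Type} (l : List α) (c : α → Prop) [DecidablePred c] (f : α → β) :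
    l.filterMap (fun x => if c x then some (f x) else none)
      = (l.filter (fun x => decide (c x))).map f := by
  induction l with
  | nil => rfl
  | cons x xs ih => by_cases hx : c x <;> simp [hx, ih]

lemma mem_items_of_mem_keys {d : PySem.Dict Char Int} (hdk : d.keys.Nodup) {x : Char}
    (hx : x ∈ d.keys) : (x, d.getD x 0) ∈ d.items := by
  simp only [PySem.Dict.keys, List.mem_map] at hx
  obtain ⟨p, hp, rfl⟩ := hx
  have h2 := PySem.Dict.getD_of_mem_items d (show (p.1, p.2) ∈ d.items by simpa using hp) hdk 0
  rw [h2]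
  simpa using hp

lemma step_items (k : Int) (d : PySem.Dict Char Int) :
    (PySem.Dict.mk (specStep k d.items)).items
      = (d.items.filter (fun q => decide (k < q.2))).map (fun q => (q.1, q.2 - k)) := by
  simp only [specStep]
  exact filterMap_ite d.items (fun q => k < q.2) (fun q => (q.1, q.2 - k))

lemma step_keys (k : Int) (d : PySem.Dict Char Int) (hdk : d.keys.Nodup) :
    (PySem.Dict.mk (specStep k d.items)).keys
      = d.keys.filter (fun x => decide (k < d.getD x 0)) := by
  have h1 : (PySem.Dict.mk (specStep k d.items)).keys
      = (d.items.filter (fun q => decide (k < q.2))).map (fun q => q.1) :=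
    calc (PySem.Dict.mk (specStep k d.items)).keys
        = ((PySem.Dict.mk (specStep k d.items)).items).map (fun q => q.1) := rfl
      _ = _ := by rw [step_items k d, List.map_map]; rfl
  rw [h1]
  have h2 : d.keys.filter (fun x => decide (k < d.getD x 0))
      = (d.items.filter (fun q => decide (k < d.getD q.1 0))).map (fun q => q.1) := by
    simp only [PySem.Dict.keys, List.filter_map]
    rfl
  rw [h2]
  congr 1
  apply List.filter_congr
  intro q hq
  have : d.getD q.1 0 = q.2 :=
    PySem.Dict.getD_of_mem_items d (show (q.1, q.2) ∈ d.items by simpa using hq) hdk 0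
  rw [this]

lemma step_getD (k : Int) (d : PySem.Dict Char Int) (hdk : d.keys.Nodup) {x : Char}
    (hx : x ∈ d.keys) (hkx : k < d.getD x 0) :
    (PySem.Dict.mk (specStep k d.items)).getD x 0 = d.getD x 0 - k := by
  have hmem : (x, d.getD x 0 - k) ∈ (PySem.Dict.mk (specStep k d.items)).items := by
    rw [step_items]
    exact List.mem_map.mpr ⟨(x, d.getD x 0),
      List.mem_filter.mpr ⟨mem_items_of_mem_keys hdk hx, by simpa using hkx⟩, rfl⟩
  have hddk : (PySem.Dict.mk (specStep k d.items)).keys.Nodup := by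
    rw [step_keys k d hdk]; exact hdk.filter _
  exact PySem.Dict.getD_of_mem_items _ hmem hddk 0

lemma pairsOf_step (k : Int) (d : PySem.Dict Char Int) (hdk : d.keys.Nodup) :
    pairsOf (PySem.Dict.mk (specStep k d.items)) = specStep k (pairsOf d) := by
  set chars := PySem.List.sorted d.keys (fun x => x) true with hchars
  have hcn : chars.Nodup := (PySem.List.sorted_perm d.keys _ true).symm.nodup hdk
  have hsorted : PySem.List.sorted (PySem.Dict.mk (specStep k d.items)).keys (fun x => x) true
      = chars.filter (fun x => decide (k < d.getD x 0)) := by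
    apply PySem.List.sorted_rev_eq_of_perm_of_pairwise_gt
    · rw [step_keys k d hdk]
      exact (PySem.List.sorted_perm d.keys _ true).filter _
    · have h1 : List.Pairwise (fun a b : Char => b ≤ a) chars :=
        PySem.List.sorted_pairwise_rev d.keys (fun x => x)
      have h2 : List.Pairwise (fun a b : Char => a ≠ b) chars := hcn
      have h3 : List.Pairwise (fun a b : Char => b < a) chars :=
        (h1.and h2).imp (fun h => lt_of_le_of_ne h.1 (fun e => h.2 e.symm))
      exact h3.filter _
  have hrhs : specStep k (pairsOf d)
      = (chars.filter (fun x => decide (k < d.getD x 0))).map (fun x => (x, d.getD x 0 - k)) := by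
    simp only [specStep, pairsOf, ← hchars, List.filterMap_map, Function.comp_def]
    exact filterMap_ite chars (fun x => k < d.getD x 0) (fun x => (x, d.getD x 0 - k))
  rw [pairsOf, hsorted, hrhs]
  apply List.map_congr_left
  intro x hx
  have hx1 : x ∈ chars := (List.mem_filter.mp hx).1
  have hx2 : k < d.getD x 0 := by simpa using (List.mem_filter.mp hx).2
  have hxk : x ∈ d.keys := (PySem.List.mem_sorted d.keys _ true x).mp hx1
  rw [step_getD k d hdk hxk hx2]

lemma aLoop_spec (k : Int) (hk : 1 ≤ k) :
    ∀ (fuel : Nat) (res : List String) (d : PySem.Dict Char Int),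
    d.keys.Nodup → (∀ x ∈ d.keys, 1 ≤ d.getD x 0) →
    aLoop k fuel (res, d) = res ++ specRows k fuel (pairsOf d) := by
  intro fuel
  induction fuel with
  | zero => intro res d _ _; simp [aLoop, specRows]
  | succ fuel ih =>
    intro res d hdk hval
    by_cases hsz : d.size = 0
    · have hitems : d.items = [] := by
        have : d.items.length = 0 := hsz
        exact List.length_eq_zero_iff.mp this
      have hkeys : d.keys = [] := by simp [PySem.Dict.keys, hitems]
      have hsn : PySem.List.sorted ([] : List Char) (fun x => x) true = [] := by
        rw [PySem.List.sorted_eq_nil_iff]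
      simp [aLoop, hsz, pairsOf, hkeys, hsn, specRows]
    · have hne : (d.size == 0) = false := by simpa using hsz
      rw [show aLoop k (fuel+1) (res, d)
          = aLoop k fuel ((PySem.List.sorted d.keys (fun x => x) true).foldl
              (aStep k (PySem.List.sorted d.keys (fun x => x) true)) (res, d)) by
        simp [aLoop, hne]]
      set chars := PySem.List.sorted d.keys (fun x => x) true with hchars
      have hcn : chars.Nodup := (PySem.List.sorted_perm d.keys _ true).symm.nodup hdk
      have hmem : ∀ ch ∈ chars, 1 ≤ d.getD ch 0 := fun ch hch =>
        hval ch ((PySem.List.mem_sorted d.keys _ true ch).mp hch)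
      rw [aRound_fold k chars chars res d hk hcn hmem hdk]
      have hall : ∀ p ∈ d.items, (fun p : Char × Int =>
            if p.1 ∈ chars then (if k < p.2 then some (p.1, p.2 - k) else none) else some p) p
          = (fun p : Char × Int => if k < p.2 then some (p.1, p.2 - k) else none) p := by
        intro p hp
        have : p.1 ∈ chars := by
          rw [PySem.List.mem_sorted]
          exact List.mem_map.mpr ⟨p, hp, rfl⟩
        simp [this]
      rw [List.filterMap_congr hall]
      have hstep : (PySem.Dict.mk (d.items.filterMap
            (fun p => if k < p.2 then some (p.1, p.2 - k) else none)))
          = PySem.Dict.mk (specStep k d.items) := rfl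
      rw [hstep]
      have hddk : (PySem.Dict.mk (specStep k d.items)).keys.Nodup := by
        rw [step_keys k d hdk]; exact hdk.filter _
      have hddval : ∀ x ∈ (PySem.Dict.mk (specStep k d.items)).keys,
          1 ≤ (PySem.Dict.mk (specStep k d.items)).getD x 0 := by
        intro x hx
        rw [step_keys k d hdk] at hx
        have hx1 := (List.mem_filter.mp hx).1
        have hx2 : k < d.getD x 0 := by simpa using (List.mem_filter.mp hx).2
        rw [step_getD k d hdk hx1 hx2]
        omega
      rw [ih _ _ hddk hddval, pairsOf_step k d hdk]
      -- now unfold one layer of specRows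
      have hkeysne : d.keys ≠ [] := by
        intro h
        apply hsz
        simp only [PySem.Dict.keys] at h
        have := List.map_eq_nil_iff.mp h
        simp [PySem.Dict.size, this]
      have hcharsne : chars ≠ [] := by
        rw [hchars, Ne, PySem.List.sorted_eq_nil_iff]
        exact hkeysne
      obtain ⟨q, qs, hqq⟩ : ∃ q qs, pairsOf d = q :: qs := by
        rcases hpd : pairsOf d with _ | ⟨q, qs⟩
        · exfalso
          apply hcharsne
          simpa [pairsOf, ← hchars] using hpd
        · exact ⟨q, qs, rfl⟩
      have hrow : chars.map (fun ch => strRepeat ch (min (d.getD ch 0) k))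
          = (pairsOf d).map (fun q => strRepeat q.1 (min q.2 k)) := by
        simp [pairsOf, ← hchars, List.map_map]
      rw [hrow, hqq]
      simp [specRows, ← hqq, List.append_assoc]

def colOf (k : Int) (p : Char × Int) : List String :=
  (PySem.List.pyRange 0 p.2 k).map (fun i => strRepeat p.1 (min k (p.2 - i)))

lemma colOf_closed {k : Int} (hk : 1 ≤ k) (ch : Char) (c : Int) :
    colOf k (ch, c) = (List.range (if 0 < c then ((c + k - 1) / k).toNat else 0)).map
      (fun (j : Nat) => strRepeat ch (min k (c - k * (j : Int)))) := by
  rw [colOf, PySem.List.pyRange_of_pos 0 c (by omega), List.map_map]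
  simp only [sub_zero, zero_add, Function.comp_def]

lemma ceil_pos {k c : Int} (hk : 1 ≤ k) (hc : 1 ≤ c) : 1 ≤ (c + k - 1) / k :=
  (Int.le_ediv_iff_mul_le (by omega)).mpr (by omega)

lemma ceil_le {k c : Int} (hk : 1 ≤ k) (hc : 0 ≤ c) : (c + k - 1) / k ≤ c := by
  have h1 : c + k - 1 < (c + 1) * k := by nlinarith
  have h2 : (c + k - 1) / k < c + 1 := by
    rw [← PySem.Int.floordiv_eq_ediv_of_pos (by omega : (0:Int) < k),
      PySem.Int.floordiv_lt_iff_lt_mul (by omega)]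
    exact h1
  omega

lemma ceil_succ {k c : Int} (hk : 1 ≤ k) (hck : k < c) :
    (c + k - 1) / k = (c - k + k - 1) / k + 1 := by
  have : c + k - 1 = (c - 1 - k) + 2 * k := by ring
  rw [this]
  have h2 : c - k + k - 1 = (c - 1 - k) + 1 * k := by ring
  rw [h2, Int.add_mul_ediv_right _ _ (by omega : k ≠ 0),
    Int.add_mul_ediv_right _ _ (by omega : k ≠ 0)]
  omega

lemma ceil_one {k c : Int} (hk : 1 ≤ k) (hc : 1 ≤ c) (hck : ¬ k < c) : (c + k - 1) / k = 1 := by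
  have h1 : 1 ≤ (c + k - 1) / k := ceil_pos hk hc
  have h2 : (c + k - 1) / k < 2 := by
    rw [← PySem.Int.floordiv_eq_ediv_of_pos (by omega : (0:Int) < k),
      PySem.Int.floordiv_lt_iff_lt_mul (by omega)]
    omega
  omega

lemma colOf_ne_nil {k c : Int} (hk : 1 ≤ k) (hc : 1 ≤ c) (ch : Char) :
    colOf k (ch, c) ≠ [] := by
  rw [colOf_closed hk]
  have h1 := ceil_pos hk hc
  intro hnil
  rw [List.map_eq_nil_iff] at hnil
  have h2 : (if 0 < c then ((c + k - 1) / k).toNat else 0) = 0 := by simpa using hnil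
  rw [if_pos (by omega : (0:Int) < c)] at h2
  omega

lemma colOf_head {k c : Int} (hk : 1 ≤ k) (hc : 1 ≤ c) (ch : Char) :
    (colOf k (ch, c))[0]? = some (strRepeat ch (min k c)) := by
  rw [colOf_closed hk]
  have h1 := ceil_pos hk hc
  have hpos : 0 < (if 0 < c then ((c + k - 1) / k).toNat else 0) := by
    rw [if_pos (by omega : (0:Int) < c)]; omega
  rw [List.getElem?_eq_getElem (by simpa using hpos)]
  simp

lemma colOf_tail {k c : Int} (hk : 1 ≤ k) (hc : 1 ≤ c) (ch : Char) :
    (colOf k (ch, c)).tail = if k < c then colOf k (ch, c - k) else [] := by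
  by_cases hck : k < c
  · rw [if_pos hck, colOf_closed hk, colOf_closed hk]
    rw [if_pos (by omega : (0:Int) < c), if_pos (by omega : (0:Int) < c - k)]
    have hn : ((c + k - 1) / k).toNat = ((c - k + k - 1) / k).toNat + 1 := by
      have := ceil_succ hk hck
      have h2 := ceil_pos hk (by omega : 1 ≤ c - k)
      omega
    rw [hn, List.range_succ_eq_map, List.map_cons, List.tail_cons, List.map_map]
    apply List.map_congr_left
    intro j _
    simp only [Function.comp]
    congr 1
    have : c - k * (j + 1 : Nat) = c - k - k * j := by push_cast; ring
    rw [show (Nat.succ j : Nat) = j + 1 from rfl]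
    push_cast
    ring_nf
  · rw [if_neg hck, colOf_closed hk, if_pos (by omega : (0:Int) < c)]
    have hn : ((c + k - 1) / k).toNat = 1 := by
      have := ceil_one hk hc hck; omega
    rw [hn]
    rfl

lemma colOf_length {k c : Int} (hk : 1 ≤ k) (hc : 0 ≤ c) (ch : Char) :
    (colOf k (ch, c)).length ≤ c.toNat := by
  rw [colOf_closed hk]
  simp only [List.length_map, List.length_range]
  split_ifs with h
  · have := ceil_le hk hc
    omega
  · omega

def rowsOut (cols : List (List String)) : Nat → List String
  | 0 => []
  | r+1 => cols.filterMap (fun col => col[0]?) ++ rowsOut (cols.map List.tail) r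

lemma rowsOut_nil : ∀ r, rowsOut [] r = [] := by
  intro r
  induction r with
  | zero => rfl
  | succ r ih => simp [rowsOut, ih]

lemma filter_tail_filter (cols : List (List String)) :
    ((cols.filter (fun c => !c.isEmpty)).map List.tail).filter (fun c => !c.isEmpty)
      = (cols.map List.tail).filter (fun c => !c.isEmpty) := by
  induction cols with
  | nil => rfl
  | cons x xs ih =>
    by_cases hx : x.isEmpty
    · have hxnil : x = [] := List.isEmpty_iff.mp hx
      simp [hxnil, ih]
    · simp only [List.filter_cons, hx, Bool.not_false, List.map_cons]
      by_cases ht : x.tail.isEmpty <;> simp [ht, ih]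

lemma rowsOut_filter (cols : List (List String)) :
    ∀ r, rowsOut cols r = rowsOut (cols.filter (fun c => !c.isEmpty)) r := by
  intro r
  induction r generalizing cols with
  | zero => rfl
  | succ r ih =>
    simp only [rowsOut]
    congr 1
    · rw [List.filterMap_filter]
      apply List.filterMap_congr
      intro col _
      by_cases hc : col.isEmpty
      · have : col = [] := List.isEmpty_iff.mp hc
        simp [this, hc]
      · simp [hc]
    · rw [ih (cols.map List.tail), ih ((cols.filter (fun c => !c.isEmpty)).map List.tail),
        filter_tail_filter]

lemma flatten_rows (cols : List (List String)) :
    ∀ n, (List.range n).flatMap (fun j => cols.filterMap (fun col => col[j]?)) = rowsOut cols n := by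
  intro n
  induction n generalizing cols with
  | zero => rfl
  | succ n ih =>
    rw [List.range_succ_eq_map, List.flatMap_cons, rowsOut]
    congr 1
    rw [List.flatMap_map]
    rw [show (fun j : Nat => cols.filterMap (fun col => col[j.succ]?))
        = (fun j : Nat => (cols.map List.tail).filterMap (fun col => col[j]?)) from ?_]
    · exact ih (cols.map List.tail)
    · funext j
      rw [List.filterMap_map]
      apply List.filterMap_congr
      intro col _
      simp [List.getElem?_tail]

lemma tail_cols_filter (k : Int) (hk : 1 ≤ k) :
    ∀ (cs : List (Char × Int)), (∀ p ∈ cs, 1 ≤ p.2) →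
    ((cs.map (fun p => (colOf k p).tail)).filter (fun c => !c.isEmpty))
      = (specStep k cs).map (colOf k) := by
  intro cs
  induction cs with
  | nil => intro _; rfl
  | cons p rest ih =>
    intro hval
    have hp2 : 1 ≤ p.2 := hval p (by simp)
    have htail : (colOf k p).tail = if k < p.2 then colOf k (p.1, p.2 - k) else [] := by
      have := colOf_tail hk hp2 p.1
      simpa using this
    by_cases hck : k < p.2
    · have hne : ¬ (colOf k (p.1, p.2 - k)).isEmpty := by
        rw [List.isEmpty_iff]
        exact colOf_ne_nil hk (by omega) p.1
      simp only [List.map_cons, List.filter_cons, htail, if_pos hck, hne, Bool.not_false,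
        specStep, List.filterMap_cons, if_pos hck]
      rw [ih (fun q hq => hval q (List.mem_cons_of_mem _ hq))]
      rfl
    · simp only [List.map_cons, List.filter_cons, htail, if_neg hck,
        List.isEmpty_nil, Bool.not_true, specStep, List.filterMap_cons, if_neg hck]
      rw [ih (fun q hq => hval q (List.mem_cons_of_mem _ hq))]
      rfl

lemma rowsOut_spec (k : Int) (hk : 1 ≤ k) :
    ∀ (fuel : Nat) (r : Nat) (cs : List (Char × Int)),
    (∀ p ∈ cs, 1 ≤ p.2) →
    (∀ p ∈ cs, (colOf k p).length ≤ r) → (∀ p ∈ cs, (colOf k p).length ≤ fuel) →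
    rowsOut (cs.map (colOf k)) r = specRows k fuel cs := by
  intro fuel r cs
  induction fuel generalizing r cs with
  | zero =>
    intro hval hr hf
    cases cs with
    | nil => simp [rowsOut_nil, specRows]
    | cons p rest =>
      exfalso
      have h1 : (colOf k p).length ≤ 0 := hf p (by simp)
      have h2 : colOf k p ≠ [] := by
        have := colOf_ne_nil hk (hval p (by simp)) p.1
        simpa using this
      rw [← List.length_pos_iff] at h2
      omega
  | succ fuel ih =>
    intro hval hr hf
    cases cs with
    | nil => simp [rowsOut_nil, specRows]
    | cons p rest =>
      have hp2 : 1 ≤ p.2 := hval p (by simp)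
      have hlen1 : 1 ≤ (colOf k p).length := by
        have h2 : colOf k p ≠ [] := by
          have := colOf_ne_nil hk hp2 p.1
          simpa using this
        rw [← List.length_pos_iff] at h2
        omega
      obtain ⟨r', rfl⟩ : ∃ r', r = r' + 1 := by
        have := hr p (by simp)
        cases r with
        | zero => omega
        | succ r' => exact ⟨r', rfl⟩
      rw [rowsOut]
      have hhead : ((p :: rest).map (colOf k)).filterMap (fun col => col[0]?)
          = (p :: rest).map (fun q => strRepeat q.1 (min q.2 k)) := by
        rw [List.filterMap_map]
        have hcg : ∀ q ∈ (p :: rest),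
            ((fun col : List String => col[0]?) ∘ colOf k) q
              = (some ∘ (fun q : Char × Int => strRepeat q.1 (min q.2 k))) q := by
          intro q hq
          have hq2 : 1 ≤ q.2 := hval q hq
          simp only [Function.comp]
          have := colOf_head hk hq2 q.1
          rw [show (q.1, q.2) = q from rfl] at this
          rw [this, min_comm]
        rw [List.filterMap_congr hcg, List.filterMap_eq_map]
      rw [hhead]
      have htails : ((p :: rest).map (colOf k)).map List.tail
          = (p :: rest).map (fun q => (colOf k q).tail) := by
        rw [List.map_map]; rfl
      rw [htails, rowsOut_filter, tail_cols_filter k hk _ hval]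
      have hstepval : ∀ q ∈ specStep k (p :: rest), 1 ≤ q.2 := by
        intro q hq
        simp only [specStep, List.mem_filterMap] at hq
        obtain ⟨a, _, ha⟩ := hq
        split_ifs at ha with h
        cases ha; simp; omega
      have hsteplen : ∀ (b : Nat), (∀ p' ∈ (p :: rest), (colOf k p').length ≤ b + 1) →
          ∀ q ∈ specStep k (p :: rest), (colOf k q).length ≤ b := by
        intro b hb q hq
        simp only [specStep, List.mem_filterMap] at hq
        obtain ⟨a, ha, hae⟩ := hq
        split_ifs at hae with h
        cases hae
        have h1 : (colOf k a).tail = colOf k (a.1, a.2 - k) := by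
          have := colOf_tail hk (hval a ha) a.1
          simpa [h] using this
        have h2 : (colOf k (a.1, a.2 - k)).length = (colOf k a).length - 1 := by
          rw [← h1, List.length_tail]
        have h3 := hb a ha
        rw [h2]
        omega
      rw [ih _ _ hstepval (hsteplen r' hr) (hsteplen fuel hf)]
      simp [specRows]

-- B's inner fold over columns is one row of the table
lemma row_eq (cols : List (List String)) (j : Nat) :
    (cols.filter (fun col => decide ((j : Int) < (col.length : Int)))).map
        (fun col => PySem.List.pyGetD col (j : Int) "") =
      cols.filterMap (fun col => col[j]?) := by
  have h1 : (fun col : List String => decide ((j : Int) < (col.length : Int)))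
      = (fun col : List String => decide (j < col.length)) := by
    funext col; simp
  have h2 : (fun col : List String => PySem.List.pyGetD col (j : Int) "")
      = (fun col : List String => col.getD j "") := by
    funext col; simp
  rw [h1, h2]
  induction cols with
  | nil => rfl
  | cons col cols ih =>
    by_cases h : j < col.length
    · have hg : col[j]? = some col[j] := List.getElem?_eq_getElem h
      rw [List.filter_cons_of_pos (by simpa using h), List.map_cons]
      simp only [List.filterMap_cons, hg, List.getD_eq_getElem?_getD, Option.getD_some]
      simp only [List.getD_eq_getElem?_getD] at ih
      rw [ih]
    · have hg : col[j]? = none := by rw [List.getElem?_eq_none_iff]; omega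
      rw [List.filter_cons_of_neg (by simpa using h)]
      simp only [List.filterMap_cons, hg]
      exact ih

-- B's whole computation is a column-major read of the chunk table
lemma alt_eq_rowsOut (s : String) (k : Int) :
    getLargestString_alt s k = PySem.Str.join ""
      (rowsOut ((pairsOf (PySem.Dict.counter s.toList)).map (colOf k))
        ((((pairsOf (PySem.Dict.counter s.toList)).map (colOf k)).map
            (fun col => (col.length : Int))).foldl max 0).toNat) := by
  simp only [getLargestString_alt]
  congr 1
  have hcols : (PySem.List.sorted (PySem.Dict.counter s.toList).keys (fun x => x) true).foldl
      (fun cols ch => cols ++ [(PySem.List.pyRange 0 ((PySem.Dict.counter s.toList).getD ch 0) k).map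
        (fun i => strRepeat ch (min k ((PySem.Dict.counter s.toList).getD ch 0 - i)))]) []
      = (pairsOf (PySem.Dict.counter s.toList)).map (colOf k) := by
    rw [PySem.List.foldl_append_singleton_eq_map, List.nil_append, pairsOf, List.map_map]
    rfl
  rw [hcols]
  set cols := (pairsOf (PySem.Dict.counter s.toList)).map (colOf k) with hcolsdef
  have hrounds : cols.foldl (fun r col => max r (col.length : Int)) 0
      = (cols.map (fun col => (col.length : Int))).foldl max 0 := by
    simp only [List.foldl_map]
  rw [hrounds]
  set rounds := (cols.map (fun col => (col.length : Int))).foldl max 0 with hroundsdef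
  have h0 : 0 ≤ rounds := (PySem.List.le_foldl_max _ _).1
  rw [PySem.List.pyRange_one, sub_zero, List.foldl_map]
  have hstep : ∀ (acc : List String), ∀ j ∈ List.range rounds.toNat,
      cols.foldl (fun out col =>
          if (0 + (j : Int)) < (col.length : Int) then out ++ [PySem.List.pyGetD col (0 + (j : Int)) ""]
          else out) acc
        = acc ++ cols.filterMap (fun col => col[j]?) := by
    intro acc j _
    have hif := PySem.List.foldl_append_if
      (fun col : List String => decide (((j : Int)) < (col.length : Int)))
      (fun col => PySem.List.pyGetD col ((j : Int)) "") cols acc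
    simp only [decide_eq_true_eq] at hif
    rw [zero_add] at *
    rw [hif, row_eq]
  rw [PySem.List.foldl_congr_mem _ _
      (fun out (j : Nat) => out ++ cols.filterMap (fun col => col[j]?)) _ hstep,
    PySem.List.foldl_append_eq_flatMap, List.nil_append, flatten_rows]

theorem getLargestString_spec : Claim_equal_getLargestString := by
  intro s k _ hpre
  unfold Spec_getLargestString
  by_cases hk : 1 ≤ k
  · -- main case: A's while-loop and B's chunk table both produce specRows
    have hdk : (PySem.Dict.counter s.toList).keys.Nodup := PySem.Dict.nodup_keys_counter s.toList
    have hval : ∀ x ∈ (PySem.Dict.counter s.toList).keys,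
        1 ≤ (PySem.Dict.counter s.toList).getD x 0 := by
      intro x hx
      rw [PySem.Dict.keys_counter, PySem.Set.mem_ofList] at hx
      rw [PySem.Dict.getD_counter]
      have := List.count_pos_iff.mpr hx
      omega
    have hpval : ∀ p ∈ pairsOf (PySem.Dict.counter s.toList), 1 ≤ p.2 := by
      intro p hp
      rw [pairsOf, List.mem_map] at hp
      obtain ⟨x, hx, rfl⟩ := hp
      exact hval x ((PySem.List.mem_sorted _ _ _ x).mp hx)
    have hA : getLargestString s k = PySem.Str.join ""
        (specRows k (s.toList.length + 1) (pairsOf (PySem.Dict.counter s.toList))) := by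
      rw [getLargestString, aLoop_spec k hk _ [] _ hdk hval, List.nil_append]
    rw [hA, alt_eq_rowsOut]
    congr 1
    set cols := (pairsOf (PySem.Dict.counter s.toList)).map (colOf k) with hcolsdef
    set rounds := (cols.map (fun col => (col.length : Int))).foldl max 0 with hroundsdef
    have hr : ∀ p ∈ pairsOf (PySem.Dict.counter s.toList), (colOf k p).length ≤ rounds.toNat := by
      intro p hp
      have hmem : ((colOf k p).length : Int) ∈ cols.map (fun col => (col.length : Int)) :=
        List.mem_map.mpr ⟨colOf k p, List.mem_map.mpr ⟨p, hp, rfl⟩, rfl⟩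
      have := (PySem.List.le_foldl_max (cols.map (fun col => (col.length : Int))) 0).2 _ hmem
      omega
    have hf : ∀ p ∈ pairsOf (PySem.Dict.counter s.toList),
        (colOf k p).length ≤ s.toList.length + 1 := by
      intro p hp
      rw [pairsOf, List.mem_map] at hp
      obtain ⟨x, _, rfl⟩ := hp
      have h0c : (0:Int) ≤ (PySem.Dict.counter s.toList).getD x 0 := by
        rw [PySem.Dict.getD_counter]; positivity
      have h1 := colOf_length hk h0c x
      rw [PySem.Dict.getD_counter] at h1 ⊢
      have h2 := List.count_le_length (a := x) (l := s.toList)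
      simp only [Int.toNat_natCast] at h1
      omega
    exact (rowsOut_spec k hk (s.toList.length + 1) rounds.toNat _ hpval hr hf).symm
  · -- k < 1 : Pre_ forces s = "", where both sides return ""
    have hs : s = "" := by
      rcases hpre with h | h
      · exact h
      · exact absurd h hk
    subst hs
    rfl
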